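-- pv_equiv track=rewrite | github.com/vinay170497/AIOPS-Anomaly-Detection-System | ingestion_engine.py | _encode_http_flags
-- ===== SOURCE A (Python) =====
-- from typing import Generator, Iterator, Optional
--
-- HTTP_STATUS_CATEGORIES = {
--     "1xx": range(100, 200),
--     "2xx": range(200, 300),
--     "3xx": range(300, 400),
--     "4xx": range(400, 500),
--     "5xx": range(500, 600),
-- }
--
-- def _encode_http_flags(status: Optional[int]) -> dict:
--     flags = {k: False for k in ["http_1xx", "http_2xx", "http_3xx", "http_4xx", "http_5xx"]}
--     if status is None:
--         return flags
--     for key, rng in HTTP_STATUS_CATEGORIES.items():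
--         col = f"http_{key}"
--         if status in rng:
--             flags[col] = True
--     return flags
-- ===== SOURCE B (Python) =====
-- def _encode_http_flags(status):
--     flags = {k: False for k in ["http_1xx", "http_2xx", "http_3xx", "http_4xx", "http_5xx"]}
--     if status is None:
--         return flags
--     key = f"http_{status // 100}xx"
--     if key in flags:
--         flags[key] = True
--     return flags
-- ===== Notes on version B (the rewrite author's own statement) =====
-- stated objective: simpler
-- what changed: replaces the scan over the five HTTP status ranges with a single closed-form key computed as status // 100, set only if that key exists in the flags dict
import Mathlib
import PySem

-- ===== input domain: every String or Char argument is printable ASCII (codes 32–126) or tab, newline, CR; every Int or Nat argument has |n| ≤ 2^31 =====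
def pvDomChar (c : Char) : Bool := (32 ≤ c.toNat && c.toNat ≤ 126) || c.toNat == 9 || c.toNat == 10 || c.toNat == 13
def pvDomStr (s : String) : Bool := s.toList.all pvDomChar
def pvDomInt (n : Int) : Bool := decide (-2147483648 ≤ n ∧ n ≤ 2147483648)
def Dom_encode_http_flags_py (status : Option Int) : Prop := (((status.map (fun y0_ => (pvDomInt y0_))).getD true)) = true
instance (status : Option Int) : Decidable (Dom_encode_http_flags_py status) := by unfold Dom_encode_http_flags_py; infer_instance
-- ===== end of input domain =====

-- B replaces A's scan over the five status ranges by the closed-form key "http_{status//100}xx",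
-- set only when that key is already present in the all-False flags dict (objective: simpler).

-- ===== PORT A =====
-- HTTP_STATUS_CATEGORIES: key ↦ range(lo, hi), in dict insertion order
def pvHttpCategories : List (String × Int × Int) :=
  [("1xx", 100, 200), ("2xx", 200, 300), ("3xx", 300, 400), ("4xx", 400, 500), ("5xx", 500, 600)]

def pvInitFlags : PySem.Dict String Bool :=
  PySem.Dict.ofList
    [("http_1xx", false), ("http_2xx", false), ("http_3xx", false),
     ("http_4xx", false), ("http_5xx", false)]

def encode_http_flags_py (status : Option Int) : List (String × Bool) :=
  let flags := pvInitFlags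
  match status with
  | none => flags.items
  | some s =>
      -- 'status in range(lo, hi)' on an int is lo ≤ status < hi
      (pvHttpCategories.foldl
        (fun fl kv =>
          let col := "http_" ++ kv.1
          if kv.2.1 ≤ s ∧ s < kv.2.2 then fl.insert col true else fl)
        flags).items

-- ===== PORT B =====
def encode_http_flags_py_alt (status : Option Int) : List (String × Bool) :=
  let flags := pvInitFlags
  match status with
  | none => flags.items
  | some s =>
      -- key = f"http_{status // 100}xx"
      let key := "http_" ++ PySem.Int.toStr (PySem.Int.floordiv s 100) ++ "xx"
      (if flags.contains key then flags.insert key true else flags).items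

-- ===== PRECONDITION & SPEC =====
def Spec_encode_http_flags_py (status : Option Int) (out : List (String × Bool)) : Prop := out = encode_http_flags_py_alt status
instance (status : Option Int) (out : List (String × Bool)) : Decidable (Spec_encode_http_flags_py status out) := by unfold Spec_encode_http_flags_py; infer_instance

-- ===== CLAIM (what is proved, stated in full; the proofs are below) =====
def Claim_equal_encode_http_flags_py : Prop := ∀ (status : Option Int), Dom_encode_http_flags_py status → Spec_encode_http_flags_py status (encode_http_flags_py status)

-- ===== LEMMAS AND PROOFS =====

-- Nat.toDigitsCore with fuel ≥ 1 adds at least one char to the accumulator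
theorem pv_toDigitsCore_len_ge (fuel : Nat) : ∀ (n : Nat) (l : List Char), 1 ≤ fuel →
    l.length + 1 ≤ (Nat.toDigitsCore 10 fuel n l).length := by
  induction fuel with
  | zero => intro n l h; omega
  | succ f ih =>
      intro n l _
      unfold Nat.toDigitsCore
      by_cases h : n / 10 = 0
      · simp [h]
      · simp only [h]
        by_cases hf : 1 ≤ f
        · have := ih (n / 10) ((n % 10).digitChar :: l) hf
          simp at this ⊢; omega
        · have hf0 : f = 0 := by omega
          subst hf0
          unfold Nat.toDigitsCore
          simp

theorem pv_toDigits_len_ge (n : Nat) : 1 ≤ (Nat.toDigits 10 n).length := by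
  unfold Nat.toDigits
  have := pv_toDigitsCore_len_ge (n + 1) n [] (by omega)
  simpa using this

-- for n ≥ 10 the decimal digit string has at least two chars
theorem pv_toDigits_two_le (n : Nat) (h : 10 ≤ n) : 2 ≤ (Nat.toDigits 10 n).length := by
  unfold Nat.toDigits
  unfold Nat.toDigitsCore
  have hnd : ¬ n / 10 = 0 := by omega
  simp only [hnd]
  have := pv_toDigitsCore_len_ge n (n / 10) [(n % 10).digitChar] (by omega)
  simp at this ⊢
  omega

-- a single-char decimal repr forces 0 ≤ q < 10
theorem pv_toChars_singleton (q : Int) (c : Char) (h : PySem.Int.toChars q = [c]) :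
    0 ≤ q ∧ q < 10 := by
  unfold PySem.Int.toChars at h
  split at h
  · have h1 := pv_toDigits_len_ge q.natAbs
    have h2 := congrArg List.length h
    simp at h2
    rw [h2] at h1
    simp at h1
  · rename_i hpos
    refine ⟨by omega, ?_⟩
    by_contra hge
    have h2 := pv_toDigits_two_le q.toNat (by omega)
    have h3 := congrArg List.length h
    simp at h3
    omega

-- outside 1..5 the repr is never a single digit '1'..'5'
theorem pv_toChars_ne (q : Int) (hq : q < 1 ∨ 5 < q) (c : Char)
    (hc : c ∈ (['1', '2', '3', '4', '5'] : List Char)) : PySem.Int.toChars q ≠ [c] := by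
  intro h
  obtain ⟨hb0, hb9⟩ := pv_toChars_singleton q c h
  rcases hq with hq | hq
  · have hq0 : q = 0 := by omega
    subst hq0
    fin_cases hc <;> exact absurd h (by decide)
  · interval_cases q <;> fin_cases hc <;> exact absurd h (by decide)

-- the computed key differs from every flags key when its middle part is no single digit '1'..'5'
theorem pv_key_ne (t : String) (d : String)
    (hd : d ∈ (["http_1xx", "http_2xx", "http_3xx", "http_4xx", "http_5xx"] : List String))
    (h : ∀ c ∈ (['1', '2', '3', '4', '5'] : List Char), t.toList ≠ [c]) :
    ("http_" ++ t ++ "xx") ≠ d := by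
  intro he
  have h2 := congrArg String.toList he
  fin_cases hd <;>
  · simp [String.toList_append] at h2
    first
    | exact h '1' (by decide) (List.append_cancel_right
        (show t.toList ++ ['x', 'x'] = ['1'] ++ ['x', 'x'] from h2))
    | exact h '2' (by decide) (List.append_cancel_right
        (show t.toList ++ ['x', 'x'] = ['2'] ++ ['x', 'x'] from h2))
    | exact h '3' (by decide) (List.append_cancel_right
        (show t.toList ++ ['x', 'x'] = ['3'] ++ ['x', 'x'] from h2))
    | exact h '4' (by decide) (List.append_cancel_right
        (show t.toList ++ ['x', 'x'] = ['4'] ++ ['x', 'x'] from h2))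
    | exact h '5' (by decide) (List.append_cancel_right
        (show t.toList ++ ['x', 'x'] = ['5'] ++ ['x', 'x'] from h2))

theorem pv_fdiv_eq (s : Int) (k : Int) (h1 : 100 * k ≤ s) (h2 : s < 100 * (k + 1)) :
    PySem.Int.floordiv s 100 = k := by
  unfold PySem.Int.floordiv
  rw [Int.fdiv_eq_ediv]
  omega

-- ===== VERDICT (by name: the statement is the Claim_ definition above) =====
theorem encode_http_flags_py_spec : Claim_equal_encode_http_flags_py := by
  intro status _
  unfold Spec_encode_http_flags_py
  match status with
  | none => rfl
  | some s =>
      by_cases h1 : 100 ≤ s ∧ s < 200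
      · have hq : PySem.Int.floordiv s 100 = 1 := pv_fdiv_eq s 1 (by omega) (by omega)
        have hB : encode_http_flags_py_alt (some s) =
            [("http_1xx", true), ("http_2xx", false), ("http_3xx", false),
             ("http_4xx", false), ("http_5xx", false)] := by
          simp only [encode_http_flags_py_alt, hq]; rfl
        rw [hB]
        simp only [encode_http_flags_py, pvHttpCategories, List.foldl]
        split_ifs <;> first | rfl | omega
      · by_cases h2 : 200 ≤ s ∧ s < 300
        · have hq : PySem.Int.floordiv s 100 = 2 := pv_fdiv_eq s 2 (by omega) (by omega)
          have hB : encode_http_flags_py_alt (some s) =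
              [("http_1xx", false), ("http_2xx", true), ("http_3xx", false),
               ("http_4xx", false), ("http_5xx", false)] := by
            simp only [encode_http_flags_py_alt, hq]; rfl
          rw [hB]
          simp only [encode_http_flags_py, pvHttpCategories, List.foldl]
          split_ifs <;> first | rfl | omega
        · by_cases h3 : 300 ≤ s ∧ s < 400
          · have hq : PySem.Int.floordiv s 100 = 3 := pv_fdiv_eq s 3 (by omega) (by omega)
            have hB : encode_http_flags_py_alt (some s) =
                [("http_1xx", false), ("http_2xx", false), ("http_3xx", true),
                 ("http_4xx", false), ("http_5xx", false)] := by
              simp only [encode_http_flags_py_alt, hq]; rfl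
            rw [hB]
            simp only [encode_http_flags_py, pvHttpCategories, List.foldl]
            split_ifs <;> first | rfl | omega
          · by_cases h4 : 400 ≤ s ∧ s < 500
            · have hq : PySem.Int.floordiv s 100 = 4 := pv_fdiv_eq s 4 (by omega) (by omega)
              have hB : encode_http_flags_py_alt (some s) =
                  [("http_1xx", false), ("http_2xx", false), ("http_3xx", false),
                   ("http_4xx", true), ("http_5xx", false)] := by
                simp only [encode_http_flags_py_alt, hq]; rfl
              rw [hB]
              simp only [encode_http_flags_py, pvHttpCategories, List.foldl]
              split_ifs <;> first | rfl | omega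
            · by_cases h5 : 500 ≤ s ∧ s < 600
              · have hq : PySem.Int.floordiv s 100 = 5 := pv_fdiv_eq s 5 (by omega) (by omega)
                have hB : encode_http_flags_py_alt (some s) =
                    [("http_1xx", false), ("http_2xx", false), ("http_3xx", false),
                     ("http_4xx", false), ("http_5xx", true)] := by
                  simp only [encode_http_flags_py_alt, hq]; rfl
                rw [hB]
                simp only [encode_http_flags_py, pvHttpCategories, List.foldl]
                (split_ifs; rfl)
              · -- out of every range: the quotient is < 1 or > 5, the key is absent, both sides all-False
                have hqr : PySem.Int.floordiv s 100 < 1 ∨ 5 < PySem.Int.floordiv s 100 := by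
                  unfold PySem.Int.floordiv
                  rw [Int.fdiv_eq_ediv]
                  omega
                have hne : ∀ d ∈ (["http_1xx", "http_2xx", "http_3xx", "http_4xx", "http_5xx"] : List String),
                    ("http_" ++ PySem.Int.toStr (PySem.Int.floordiv s 100) ++ "xx") ≠ d := by
                  intro d hd
                  apply pv_key_ne _ _ hd
                  intro c hc ht
                  have hts : PySem.Int.toChars (PySem.Int.floordiv s 100) = [c] := by
                    rw [← PySem.Int.toList_toStr]; exact ht
                  exact pv_toChars_ne _ hqr c hc hts
                have hitems : pvInitFlags.items =
                    [("http_1xx", false), ("http_2xx", false), ("http_3xx", false),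
                     ("http_4xx", false), ("http_5xx", false)] := by rfl
                have hcont : pvInitFlags.contains
                    ("http_" ++ PySem.Int.toStr (PySem.Int.floordiv s 100) ++ "xx") = false := by
                  simp only [PySem.Dict.contains, hitems]
                  simp only [List.any_cons, List.any_nil, Bool.or_eq_false_iff, beq_eq_false_iff_ne]
                  exact ⟨fun h => hne _ (by decide) h.symm, fun h => hne _ (by decide) h.symm,
                         fun h => hne _ (by decide) h.symm, fun h => hne _ (by decide) h.symm,
                         fun h => hne _ (by decide) h.symm, trivial⟩
                have hB : encode_http_flags_py_alt (some s) = pvInitFlags.items := by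
                  simp only [encode_http_flags_py_alt, hcont]
                  simp
                rw [hB]
                simp only [encode_http_flags_py, pvHttpCategories, List.foldl]
                (split_ifs; rfl)
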